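-- pv_equiv track=rewrite | github.com/neuro-inc/neuro-cli | neuro-sdk/src/neuro_sdk/file_filter.py | _strip_trailing_spaces
-- ===== SOURCE A (Python) =====
-- def _strip_trailing_spaces(s: str) -> str:
--     last_space = None
--     escaped = False
--     for i, c in enumerate(s):
--         if escaped:
--             escaped = False
--         else:
--             escaped = c == "\\"
--             if c != " ":
--                 last_space = None
--             elif last_space is None:
--                 last_space = i
--     if last_space is not None:
--         s = s[:last_space]
--     return s
-- ===== SOURCE B (Python) =====
-- def _strip_trailing_spaces(s: str) -> str:
--     n = len(s)
--     # k = number of trailing literal spaces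
--     k = 0
--     while k < n and s[n - 1 - k] == " ":
--         k += 1
--     if k == 0:
--         return s
--     # m = number of consecutive backslashes immediately before the space block
--     m = 0
--     while m < n - k and s[n - k - 1 - m] == "\\":
--         m += 1
--     cut = n - k + (1 if m % 2 == 1 else 0)
--     return s[:cut]
-- ===== Notes on version B (the rewrite author's own statement) =====
-- stated objective: faster
-- what changed: Replaces A's forward state machine (escaped-toggle plus last_space tracking over every character) by a reverse scan: count the trailing spaces k and the backslash run m just before them, then cut k spaces (k-1 if m is odd, since one space is escaped).
import Mathlib
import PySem

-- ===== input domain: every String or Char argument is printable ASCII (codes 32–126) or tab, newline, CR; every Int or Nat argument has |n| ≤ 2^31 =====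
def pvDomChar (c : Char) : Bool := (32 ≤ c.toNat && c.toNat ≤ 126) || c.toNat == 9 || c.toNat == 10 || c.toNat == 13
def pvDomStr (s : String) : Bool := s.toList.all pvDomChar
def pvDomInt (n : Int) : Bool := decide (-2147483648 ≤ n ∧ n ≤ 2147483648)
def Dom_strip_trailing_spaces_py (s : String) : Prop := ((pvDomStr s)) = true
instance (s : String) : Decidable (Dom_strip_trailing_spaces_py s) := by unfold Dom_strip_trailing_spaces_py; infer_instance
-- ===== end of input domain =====

-- B replaces A's forward escaped-toggle state machine by a reverse scan (count trailing
-- spaces, then the parity of the backslash run before them); objective: simpler.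

-- ===== PORT A =====
-- one step of A's loop body; state = (last_space, escaped), item = (i, c) from enumerate
def stepA (st : Option Int × Bool) (ic : Int × Char) : Option Int × Bool :=
  if st.2 then (st.1, false)
  else
    (if ic.2 ≠ ' ' then none
     else match st.1 with
          | none => some ic.1
          | some j => some j,
     ic.2 == '\\')

def strip_trailing_spaces_py (s : String) : String :=
  let cs := s.toList
  let r := (PySem.List.enumerate cs).foldl stepA (none, false)
  match r.1 with
  | some i => String.ofList (PySem.List.slice cs none (some i))   -- s[:last_space]
  | none => s

-- ===== PORT B =====
def strip_trailing_spaces_py_alt (s : String) : String :=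
  let cs := s.toList
  let k := (cs.reverse.takeWhile (· == ' ')).length
  if k = 0 then s
  else
    let m := ((cs.reverse.drop k).takeWhile (· == '\\')).length
    let cut := cs.length - k + (if m % 2 = 1 then 1 else 0)
    String.ofList (cs.take cut)   -- s[:cut], 0 ≤ cut ≤ len(s)

-- ===== PRECONDITION & SPEC =====
def Spec_strip_trailing_spaces_py (s : String) (out : String) : Prop := out = strip_trailing_spaces_py_alt s
instance (s : String) (out : String) : Decidable (Spec_strip_trailing_spaces_py s out) := by unfold Spec_strip_trailing_spaces_py; infer_instance

-- ===== CLAIM (what is proved, stated in full; the proofs are below) =====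
def Claim_equal_strip_trailing_spaces_py : Prop := ∀ (s : String), Dom_strip_trailing_spaces_py s → Spec_strip_trailing_spaces_py s (strip_trailing_spaces_py s)

-- ===== LEMMAS AND PROOFS =====

-- number of trailing spaces of p
def kSpec (p : List Char) : Nat := (p.reverse.takeWhile (· == ' ')).length
-- number of backslashes immediately before p's trailing space block
def mSpec (p : List Char) : Nat := ((p.reverse.drop (kSpec p)).takeWhile (· == '\\')).length
-- A's escaped flag after processing p = parity of p's trailing backslash run
def escSpec (p : List Char) : Bool := decide ((p.reverse.takeWhile (· == '\\')).length % 2 = 1)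
-- A's last_space after processing p
def lsSpec (p : List Char) : Option Int :=
  if kSpec p = 0 then none
  else if mSpec p % 2 = 1 then
    (if kSpec p = 1 then none else some ((p.length : Int) - (kSpec p - 1 : Nat)))
  else some ((p.length : Int) - (kSpec p : Nat))

lemma kSpec_le (p : List Char) : kSpec p ≤ p.length := by
  have h := (List.takeWhile_prefix (p := (· == ' ')) (l := p.reverse)).length_le
  simpa [kSpec] using h

lemma kSpec_snoc (p : List Char) (c : Char) :
    kSpec (p ++ [c]) = if c = ' ' then kSpec p + 1 else 0 := by
  simp only [kSpec, List.reverse_append, List.reverse_singleton, List.singleton_append,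
    List.takeWhile_cons]
  by_cases h : c = ' ' <;> simp [h]

lemma decide_succ_mod_two (n : Nat) : decide ((n + 1) % 2 = 1) = !decide (n % 2 = 1) := by
  by_cases h : n % 2 = 1 <;> simp [h] <;> omega

lemma escSpec_snoc (p : List Char) (c : Char) :
    escSpec (p ++ [c]) = if c = '\\' then !escSpec p else false := by
  simp only [escSpec, List.reverse_append, List.reverse_singleton, List.singleton_append,
    List.takeWhile_cons]
  by_cases h : c = '\\'
  · simp [h, decide_succ_mod_two]
  · simp [h]

lemma mSpec_snoc_space (p : List Char) :
    mSpec (p ++ [' ']) = mSpec p := by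
  simp [mSpec, kSpec_snoc, List.reverse_append]

lemma mSpec_of_k_zero (p : List Char) (h : kSpec p = 0) :
    (mSpec p % 2 = 1) ↔ escSpec p = true := by
  simp [mSpec, escSpec, h]

lemma kSpec_of_esc (p : List Char) (h : escSpec p = true) : kSpec p = 0 := by
  cases hp : p.reverse with
  | nil => simp [escSpec, hp] at h
  | cons c t =>
    have hc : c = '\\' := by
      by_contra hc
      simp [escSpec, hp, hc] at h
    simp [kSpec, hp, hc]

lemma foldA_spec (p : List Char) :
    (PySem.List.enumerate p).foldl stepA (none, false) = (lsSpec p, escSpec p) := by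
  induction p using List.reverseRecOn with
  | nil => simp [PySem.List.enumerate, lsSpec, escSpec, kSpec]
  | append_singleton p c ih =>
    rw [PySem.List.enumerate_append, List.foldl_append, ih]
    have hk := kSpec_snoc p c
    have hesc := escSpec_snoc p c
    by_cases hc : c = ' '
    · subst hc
      have hm := mSpec_snoc_space p
      by_cases he : escSpec p = true
      · have hk0 : kSpec p = 0 := kSpec_of_esc p he
        have hmo : mSpec p % 2 = 1 := (mSpec_of_k_zero p hk0).2 he
        simp [PySem.List.enumerate, stepA, he, lsSpec, hk, hk0, hesc, hm, hmo]
      · have he' : escSpec p = false := by simpa using he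
        by_cases hk0 : kSpec p = 0
        · have hme : ¬ (mSpec p % 2 = 1) := fun h => he ((mSpec_of_k_zero p hk0).1 h)
          simp [PySem.List.enumerate, stepA, he', lsSpec, hk, hk0, hesc, hm, hme]
        · by_cases hmo : mSpec p % 2 = 1
          · by_cases hk1 : kSpec p = 1
            · simp [PySem.List.enumerate, stepA, he', lsSpec, hk, hk1, hesc, hm, hmo]
            · have hle := kSpec_le p
              simp [PySem.List.enumerate, stepA, he', lsSpec, hk, hk0, hk1, hesc, hm, hmo,
                Prod.ext_iff]
              omega
          · have hle := kSpec_le p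
            simp [PySem.List.enumerate, stepA, he', lsSpec, hk, hk0, hesc, hm, hmo]
    · have hkc : kSpec (p ++ [c]) = 0 := by simp [hk, hc]
      have hlc : lsSpec (p ++ [c]) = none := by simp [lsSpec, hkc]
      by_cases he : escSpec p = true
      · have hk0 : kSpec p = 0 := kSpec_of_esc p he
        have hloc : lsSpec p = none := by simp [lsSpec, hk0]
        have hec : escSpec (p ++ [c]) = false := by
          rw [hesc]; by_cases hcb : c = '\\' <;> simp [hcb, he]
        simp [PySem.List.enumerate, stepA, he, hloc, hlc, hec]
      · have he' : escSpec p = false := by simpa using he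
        have hec : escSpec (p ++ [c]) = (c == '\\') := by
          rw [hesc]; by_cases hcb : c = '\\' <;> simp [hcb, he']
        simp [PySem.List.enumerate, stepA, he', hlc, hec, hc]

lemma matchRed (cs : List Char) (t : String) (i : Int) :
    (match some i with
     | some j => String.ofList (PySem.List.slice cs none (some j))
     | none => t) = String.ofList (PySem.List.slice cs none (some i)) := rfl

-- ===== VERDICT (by name: the statement is the Claim_ definition above) =====
theorem strip_trailing_spaces_py_spec : Claim_equal_strip_trailing_spaces_py := by
  intro s _
  show strip_trailing_spaces_py s = strip_trailing_spaces_py_alt s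
  have hle : (List.takeWhile (fun x => x == ' ') s.toList.reverse).length ≤ s.toList.length := by
    simpa [kSpec] using kSpec_le s.toList
  simp only [strip_trailing_spaces_py, strip_trailing_spaces_py_alt, foldA_spec, lsSpec, kSpec,
    mSpec]
  by_cases h0 : (List.takeWhile (fun x => x == ' ') s.toList.reverse).length = 0
  · simp [h0]
  · rw [if_neg h0, if_neg h0]
    by_cases hm : (List.takeWhile (fun x => x == '\\')
        (List.drop (List.takeWhile (fun x => x == ' ') s.toList.reverse).length
          s.toList.reverse)).length % 2 = 1
    · rw [if_pos hm, if_pos hm]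
      by_cases h1 : (List.takeWhile (fun x => x == ' ') s.toList.reverse).length = 1
      · rw [if_pos h1, h1]
        have hlen : s.toList.length = s.length := by simp
        have htk : List.take (s.toList.length - 1 + 1) s.toList = s.toList :=
          List.take_of_length_le (by omega)
        rw [htk]
        simp
      · rw [if_neg h1]
        rw [matchRed s.toList s _, PySem.List.slice_to _ (by omega)]
        have hlen : s.toList.length = s.length := by simp
        congr 2
        omega
    · rw [if_neg hm, if_neg hm]
      rw [matchRed s.toList s _, PySem.List.slice_to _ (by omega)]
      have hlen : s.toList.length = s.length := by simp
      congr 2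
      omega
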